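-- pv_equiv track=rewrite | github.com/WHooXi/Options | base.py | lookback_max_array
-- ===== SOURCE A (Python) =====
-- def lookback_max_array(martix):#得到矩阵中每一列最大的值
--     res_array=[]
--     for j in range(len(martix[0])):
--         one_array=[]
--         for i in range(len(martix)):
--             one_array.append(int(martix[i][j]))
--         res_array.append(max(one_array))
--     return res_array
-- ===== SOURCE B (Python) =====
-- def lookback_max_array(martix):
--     # Column maxima in a single row-major pass: start from the first row
--     # and fold each later row in with an elementwise max.
--     res = [int(x) for x in martix[0]]
--     for row in martix[1:]:
--         res = [max(r, int(x)) for r, x in zip(res, row)]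
--     return res
-- ===== Notes on version B (the rewrite author's own statement) =====
-- stated objective: simpler
-- what changed: B replaces A's column-by-column construction (build each column list, then call max on it) with a single row-major pass that folds every row into a running vector of column maxima via elementwise max.
import Mathlib
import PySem

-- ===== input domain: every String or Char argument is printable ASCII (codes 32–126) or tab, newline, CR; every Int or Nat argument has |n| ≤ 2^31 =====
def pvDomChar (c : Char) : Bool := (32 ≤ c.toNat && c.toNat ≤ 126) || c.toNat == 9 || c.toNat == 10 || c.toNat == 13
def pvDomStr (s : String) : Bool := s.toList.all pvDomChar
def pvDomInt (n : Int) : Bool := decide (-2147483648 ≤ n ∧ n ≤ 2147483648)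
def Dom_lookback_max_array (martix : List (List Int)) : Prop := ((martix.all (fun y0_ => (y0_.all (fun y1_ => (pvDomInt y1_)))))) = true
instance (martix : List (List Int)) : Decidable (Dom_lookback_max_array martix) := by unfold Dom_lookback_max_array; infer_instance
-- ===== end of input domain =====

-- B computes the column maxima in one row-major pass (running elementwise max) instead of
-- A's column-by-column construction; return values agree on every input where A returns.

-- ===== PORT A =====
def lookback_max_array (martix : List (List Int)) : List Int :=
  (PySem.List.pyRange 0 ((PySem.List.pyGetD martix 0 []).length) 1).foldl
    (fun res_array j =>
      let one_array :=
        (PySem.List.pyRange 0 martix.length 1).foldl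
          (fun one_arr i =>
            one_arr ++ [PySem.List.pyGetD (PySem.List.pyGetD martix i []) j 0]) []
      res_array ++ [(PySem.List.max? one_array (fun y => y)).getD 0]) []

-- ===== PORT B =====
def lookback_max_array_alt (martix : List (List Int)) : List Int :=
  match martix with
  | [] => []
  | r0 :: rest =>
      rest.foldl (fun res row => (res.zip row).map (fun p => max p.1 p.2)) r0

-- ===== PRECONDITION & SPEC =====
-- Pre_ excludes exactly the inputs on which A raises IndexError: the empty matrix
-- (martix[0]) and matrices with a row shorter than the first row (martix[i][j]).
def Pre_lookback_max_array (martix : List (List Int)) : Prop :=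
  martix ≠ [] ∧ ∀ row ∈ martix, (martix.headD []).length ≤ row.length
instance (martix : List (List Int)) : Decidable (Pre_lookback_max_array martix) := by
  unfold Pre_lookback_max_array; infer_instance

def pvWitness_lookback_max_array : List (List Int) := [[1, -2, 3], [4, 0, -5]]

def Spec_lookback_max_array (martix : List (List Int)) (out : List Int) : Prop :=
  out = lookback_max_array_alt martix
instance (martix : List (List Int)) (out : List Int) : Decidable (Spec_lookback_max_array martix out) := by
  unfold Spec_lookback_max_array; infer_instance

-- ===== CLAIM (what is proved, stated in full; the proofs are below) =====
def Claim_equal_lookback_max_array : Prop :=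
  ∀ (martix : List (List Int)), Dom_lookback_max_array martix →
    Pre_lookback_max_array martix →
    Spec_lookback_max_array martix (lookback_max_array martix)

-- ===== LEMMAS AND PROOFS =====

-- B's running elementwise-max fold, characterised pointwise.
theorem alt_fold_char (rest : List (List Int)) :
    ∀ (res : List Int), (∀ row ∈ rest, res.length ≤ row.length) →
    rest.foldl (fun res row => (res.zip row).map (fun p => max p.1 p.2)) res
      = (List.range res.length).map
          (fun k => rest.foldl (fun acc row => max acc (row.getD k 0)) (res.getD k 0)) := by
  induction rest with
  | nil =>
      intro res _
      simp only [List.foldl_nil]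
      apply List.ext_getElem
      · simp
      · intro i h1 h2
        simp_all [List.getD_eq_getElem?_getD]
  | cons row t ih =>
      intro res hlen
      have hrow : res.length ≤ row.length := hlen row (by simp)
      have hlen' : ((res.zip row).map (fun p => max p.1 p.2)).length = res.length := by
        simp [List.length_zip]; omega
      simp only [List.foldl_cons]
      rw [ih _ (by intro r hr; rw [hlen']; exact hlen r (by simp [hr]))]
      rw [hlen']
      apply List.map_congr_left
      intro k hk
      have hk' : k < res.length := List.mem_range.mp hk
      have hkr : k < row.length := lt_of_lt_of_le hk' hrow
      have : ((res.zip row).map (fun p => max p.1 p.2)).getD k 0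
          = max (res.getD k 0) (row.getD k 0) := by
        rw [List.getD_eq_getElem _ _ (by rw [hlen']; exact hk'),
            List.getD_eq_getElem _ _ hk', List.getD_eq_getElem _ _ hkr]
        simp
      rw [this]

-- ===== VERDICT (by name: the statement is the Claim_ definition above) =====
theorem lookback_max_array_spec : Claim_equal_lookback_max_array := by
  intro martix _ hpre
  obtain ⟨hne, hrows⟩ := hpre
  obtain ⟨r0, rest, rfl⟩ : ∃ r0 rest, martix = r0 :: rest := by
    cases martix with
    | nil => exact absurd rfl hne
    | cons a b => exact ⟨a, b, rfl⟩
  simp only [List.headD_cons] at hrows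
  unfold Spec_lookback_max_array lookback_max_array lookback_max_array_alt
  -- A's inner loop over row indices is a fold over the rows themselves
  have hinner : ∀ j : Int,
      (PySem.List.pyRange 0 ((r0 :: rest).length) 1).foldl
        (fun one_arr i =>
          one_arr ++ [PySem.List.pyGetD (PySem.List.pyGetD (r0 :: rest) i []) j 0]) []
      = (r0 :: rest).map (fun row => PySem.List.pyGetD row j 0) := by
    intro j
    rw [PySem.List.foldl_pyRange_zero_pyGetD' (r0 :: rest) []
          (fun one_arr row => one_arr ++ [PySem.List.pyGetD row j 0]) []]
    exact PySem.List.foldl_append_singleton_eq_map _ _ []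
  simp only [PySem.List.pyGetD_zero_cons]
  rw [PySem.List.foldl_append_singleton_eq_map _ _ []]
  simp only [hinner]
  -- rewrite A to a map over List.range
  rw [PySem.List.pyRange_zero_nat, List.map_map, List.nil_append]
  rw [alt_fold_char rest r0 (by intro r hr; exact hrows r (List.mem_cons_of_mem _ hr))]
  apply List.map_congr_left
  intro k hk
  have hk' : k < r0.length := List.mem_range.mp hk
  simp only [Function.comp]
  -- max of the built column equals the running fold
  rw [show (r0 :: rest).map (fun row => PySem.List.pyGetD row (k : Int) 0)
        = PySem.List.pyGetD r0 (k : Int) 0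
          :: rest.map (fun row => PySem.List.pyGetD row (k : Int) 0) from rfl]
  rw [PySem.List.max?_id_cons]
  simp only [Option.getD_some, List.foldl_map, PySem.List.pyGetD_natCast]
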